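-- pv_equiv track=rewrite | github.com/itrummer/dbz | libraries/list_engine_manual.py | group_by_max
-- ===== SOURCE A (Python) =====
-- def group_by_max(table, agg_column, group_columns):
--     """ Calculate max for each value combination in group columns.
--
--     Args:
--         table: a list of rows where each row is a list.
--         agg_column: index of column for which to calculate max.
--         group_columns: indexes of columns to group by.
--
--     Returns:
--         group columns and associated max: a list of rows where each row is a list.
--     """
--     # create a dictionary with group columns as keys and max as values
--     group_dict = {}
--     for row in table:
--         # create a tuple of group columns
--         group_tuple = tuple([row[i] for i in group_columns])
--         agg_value = row[agg_column]
--         # if group_tuple is not in group_dict, add it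
--         if group_tuple not in group_dict:
--             group_dict[group_tuple] = agg_value
--         else:
--             prior_value = group_dict[group_tuple]
--             if prior_value is None:
--                 group_dict[group_tuple] = agg_value
--             elif agg_value is not None:
--                 group_dict[group_tuple] = max(prior_value, agg_value)
--     # create a list of group columns and associated max
--     group_list = []
--     for key in group_dict:
--         group_list.append(list(key) + [group_dict[key]])
--     return group_list
-- ===== SOURCE B (Python) =====
-- def group_by_max(table, agg_column, group_columns):
--     """Collect all agg values per group first, then reduce each group once."""
--     groups = {}
--     for row in table:
--         key = tuple(row[i] for i in group_columns)
--         groups.setdefault(key, []).append(row[agg_column])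
--     result = []
--     for key, values in groups.items():
--         non_null = [v for v in values if v is not None]
--         result.append(list(key) + [max(non_null) if non_null else None])
--     return result
-- ===== Notes on version B (the rewrite author's own statement) =====
-- stated objective: alternative
-- what changed: Replaces the incremental running-max with None special-casing by a collect-then-reduce shape: first pass builds a dict of per-group value lists via setdefault/append, second pass filters out None and takes one max per group.
import Mathlib
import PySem

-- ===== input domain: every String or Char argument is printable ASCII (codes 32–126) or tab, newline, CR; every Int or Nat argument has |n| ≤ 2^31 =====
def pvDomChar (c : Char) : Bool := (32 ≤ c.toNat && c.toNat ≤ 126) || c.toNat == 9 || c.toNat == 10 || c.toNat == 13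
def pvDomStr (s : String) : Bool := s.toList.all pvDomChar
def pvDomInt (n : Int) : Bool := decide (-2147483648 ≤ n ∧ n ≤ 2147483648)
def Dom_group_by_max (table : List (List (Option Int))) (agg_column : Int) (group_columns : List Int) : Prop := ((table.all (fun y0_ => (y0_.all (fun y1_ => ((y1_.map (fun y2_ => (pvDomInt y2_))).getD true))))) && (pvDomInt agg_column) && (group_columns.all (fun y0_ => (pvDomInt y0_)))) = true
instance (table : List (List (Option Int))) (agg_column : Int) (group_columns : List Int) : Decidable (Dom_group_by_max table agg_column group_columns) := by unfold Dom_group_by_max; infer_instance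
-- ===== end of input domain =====

-- B replaces A's incremental running-max (with None special cases) by collect-all-then-reduce: alternative decomposition, same cost.


-- ===== PORT A =====
-- row[i] is ported as pyGetD … none; exact on Pre_ (all indexes in range, so pyGet? never returns none there).
def group_by_max (table : List (List (Option Int))) (agg_column : Int) (group_columns : List Int) : List (List (Option Int)) :=
  let group_dict : PySem.Dict (List (Option Int)) (Option Int) :=
    table.foldl (fun d row =>
      let group_tuple := group_columns.map (fun i => PySem.List.pyGetD row i none)
      let agg_value := PySem.List.pyGetD row agg_column none
      match d.get? group_tuple with
      | none => d.insert group_tuple agg_value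
      | some prior =>
        match prior with
        | none => d.insert group_tuple agg_value
        | some p =>
          match agg_value with
          | none => d
          | some a => d.insert group_tuple (some (max p a))) PySem.Dict.empty
  group_dict.items.map (fun kv => kv.1 ++ [kv.2])

-- ===== PORT B =====
def group_by_max_alt (table : List (List (Option Int))) (agg_column : Int) (group_columns : List Int) : List (List (Option Int)) :=
  let groups : PySem.Dict (List (Option Int)) (List (Option Int)) :=
    table.foldl (fun d row =>
      let key := group_columns.map (fun i => PySem.List.pyGetD row i none)
      d.insert key ((d.getD key []) ++ [PySem.List.pyGetD row agg_column none])) PySem.Dict.empty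
  groups.items.map (fun kv =>
    let nonNull := kv.2.filterMap id
    kv.1 ++ [nonNull.max?])

-- ===== PRECONDITION & SPEC =====
-- Pre_ excludes exactly the inputs on which A raises IndexError: some row too short for agg_column or a group column.
def Pre_group_by_max (table : List (List (Option Int))) (agg_column : Int) (group_columns : List Int) : Prop :=
  ∀ row ∈ table, PySem.Raise.InRange row.length agg_column ∧
    ∀ i ∈ group_columns, PySem.Raise.InRange row.length i
instance (table : List (List (Option Int))) (agg_column : Int) (group_columns : List Int) : Decidable (Pre_group_by_max table agg_column group_columns) := by unfold Pre_group_by_max; infer_instance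
def pvWitness_group_by_max : List (List (Option Int)) × Int × List Int :=
  ([[some 1, some 2], [some 1, none], [some 3, some 5]], 1, [0])

def Spec_group_by_max (table : List (List (Option Int))) (agg_column : Int) (group_columns : List Int) (out : List (List (Option Int))) : Prop := out = group_by_max_alt table agg_column group_columns
instance (table : List (List (Option Int))) (agg_column : Int) (group_columns : List Int) (out : List (List (Option Int))) : Decidable (Spec_group_by_max table agg_column group_columns out) := by unfold Spec_group_by_max; infer_instance

-- ===== CLAIM (what is proved, stated in full; the proofs are below) =====
def Claim_equal_group_by_max : Prop := ∀ (table : List (List (Option Int))) (agg_column : Int) (group_columns : List Int), Dom_group_by_max table agg_column group_columns → Pre_group_by_max table agg_column group_columns → Spec_group_by_max table agg_column group_columns (group_by_max table agg_column group_columns)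

-- ===== LEMMAS AND PROOFS =====

-- A's stored scalar for a group is the reduction of B's stored value list.
def pvRed (vs : List (Option Int)) : Option Int := (vs.filterMap id).max?

theorem pvRed_singleton (v : Option Int) : pvRed [v] = v := by
  cases v <;> simp [pvRed, List.filterMap]

theorem max?_concat (l : List Int) (a : Int) :
    (l ++ [a]).max? = some (l.max?.elim a (fun m => max m a)) := by
  induction l with
  | nil => simp
  | cons x xs ih =>
    cases h : xs.max? with
    | none =>
      have hx : xs = [] := List.max?_eq_none_iff.mp h
      subst hx; simp
    | some m =>
      have : xs ++ [a] ≠ [] := by simp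
      simp only [List.cons_append, List.max?_cons, ih, h]
      simp [max_assoc]

theorem pvRed_concat_none (vs : List (Option Int)) : pvRed (vs ++ [none]) = pvRed vs := by
  simp [pvRed]

theorem pvRed_concat_some_of_none (vs : List (Option Int)) (a : Int) (h : pvRed vs = none) :
    pvRed (vs ++ [some a]) = some a := by
  unfold pvRed at h ⊢
  rw [List.filterMap_append, List.max?_eq_none_iff.mp h]
  rfl

theorem pvRed_concat_some_of_some (vs : List (Option Int)) (a p : Int) (h : pvRed vs = some p) :
    pvRed (vs ++ [some a]) = some (max p a) := by
  unfold pvRed at h ⊢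
  rw [List.filterMap_append, show List.filterMap id [some a] = [a] from rfl, max?_concat, h]
  rfl

-- get? through a value-map of the items
theorem get?_mk_map_snd {κ ν ν' : Type} [BEq κ] (f : ν → ν') (l : List (κ × ν)) (k : κ) :
    (PySem.Dict.mk (l.map (fun p => (p.1, f p.2)))).get? k = ((PySem.Dict.mk l).get? k).map f := by
  induction l with
  | nil => simp [PySem.Dict.get?]
  | cons p rest ih =>
    simp only [List.map_cons]
    rw [PySem.Dict.get?_mk_cons, PySem.Dict.get?_mk_cons]
    by_cases h : (p.1 == k) = true
    · rw [if_pos h, if_pos h]; rfl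
    · rw [if_neg h, if_neg h]; exact ih

-- One row's effect: A's update of its scalar dict mirrors B's append to its list dict.
theorem step_items (k : List (Option Int)) (v : Option Int)
    (dA : PySem.Dict (List (Option Int)) (Option Int))
    (dB : PySem.Dict (List (Option Int)) (List (Option Int)))
    (hitems : dA.items = dB.items.map (fun p => (p.1, pvRed p.2)))
    (hnd : dB.keys.Nodup) :
    (match dA.get? k with
      | none => dA.insert k v
      | some prior =>
        match prior with
        | none => dA.insert k v
        | some p =>
          match v with
          | none => dA
          | some a => dA.insert k (some (max p a))).items
      = (dB.insert k ((dB.getD k []) ++ [v])).items.map (fun p => (p.1, pvRed p.2)) := by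
  have hget : dA.get? k = (dB.get? k).map pvRed := by
    obtain ⟨lA⟩ := dA
    obtain ⟨lB⟩ := dB
    have : lA = lB.map (fun p => (p.1, pvRed p.2)) := hitems
    subst this
    exact get?_mk_map_snd pvRed lB k
  cases hB : dB.get? k with
  | none =>
    have hcB : dB.contains k = false := by
      rw [PySem.Dict.contains_eq_isSome_get?, hB]; rfl
    have hcA : dA.contains k = false := by
      rw [PySem.Dict.contains_eq_isSome_get?, hget, hB]; rfl
    have hA : dA.get? k = none := by rw [hget, hB]; rfl
    have hgd : dB.getD k [] = [] := PySem.Dict.getD_of_get?_eq_none dB [] hB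
    rw [hA]
    show (dA.insert k v).items = _
    rw [hgd, PySem.Dict.items_insert_of_not_contains dA v hcA,
        PySem.Dict.items_insert_of_not_contains dB ([] ++ [v]) hcB,
        List.map_append, hitems]
    simp [pvRed_singleton]
  | some vs =>
    have hcB : dB.contains k = true := by
      rw [PySem.Dict.contains_eq_isSome_get?, hB]; rfl
    have hcA : dA.contains k = true := by
      rw [PySem.Dict.contains_eq_isSome_get?, hget, hB]; rfl
    have hA : dA.get? k = some (pvRed vs) := by rw [hget, hB]; rfl
    have hgd : dB.getD k [] = vs := PySem.Dict.getD_of_get?_eq_some dB [] hB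
    have hval : ∀ q ∈ dB.items, q.1 = k → q.2 = vs := by
      intro q hq hq1
      have h1 : dB.get? q.1 = some q.2 := PySem.Dict.get?_of_mem_items dB (by exact hq) hnd
      rw [hq1, hB] at h1
      exact (Option.some_inj.mp h1).symm
    have hmapB : (dB.insert k (vs ++ [v])).items
        = dB.items.map (fun q => if q.1 == k then (k, vs ++ [v]) else q) :=
      PySem.Dict.items_insert_of_contains dB (vs ++ [v]) hcB
    -- the common shape when A performs an insert at k
    have key_items : ∀ (w : Option Int), pvRed (vs ++ [v]) = w →
        (dB.insert k (vs ++ [v])).items.map (fun p => (p.1, pvRed p.2))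
        = (dA.insert k w).items := by
      intro w hw
      rw [hmapB, PySem.Dict.items_insert_of_contains dA w hcA, hitems, List.map_map, List.map_map]
      apply List.map_congr_left
      intro q hq
      by_cases h1 : (q.1 == k) = true
      · have hq2 : q.2 = vs := hval q hq (eq_of_beq h1)
        simp [Function.comp, hw, eq_of_beq h1]
      · simp [Function.comp, h1]
    rw [hA, hgd]
    cases hred : pvRed vs with
    | none =>
      show (dA.insert k v).items = _
      refine (key_items v ?_).symm
      cases v with
      | none => rw [pvRed_concat_none]; exact hred
      | some a => exact pvRed_concat_some_of_none vs a hred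
    | some p =>
      cases v with
      | none =>
        show dA.items = _
        rw [hmapB, hitems, List.map_map]
        apply List.map_congr_left
        intro q hq
        by_cases h1 : (q.1 == k) = true
        · have hq2 : q.2 = vs := hval q hq (eq_of_beq h1)
          simp [Function.comp, hq2, pvRed_concat_none, eq_of_beq h1]
        · simp [Function.comp, h1]
      | some a =>
        show (dA.insert k (some (max p a))).items = _
        exact (key_items (some (max p a)) (pvRed_concat_some_of_some vs a p hred)).symm

-- The loop invariant carried through the whole table.
theorem loop_invariant (agg_column : Int) (group_columns : List Int)
    (table : List (List (Option Int)))
    (dA : PySem.Dict (List (Option Int)) (Option Int))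
    (dB : PySem.Dict (List (Option Int)) (List (Option Int)))
    (hitems : dA.items = dB.items.map (fun p => (p.1, pvRed p.2)))
    (hnd : dB.keys.Nodup) :
    (table.foldl (fun d row =>
      let group_tuple := group_columns.map (fun i => PySem.List.pyGetD row i none)
      let agg_value := PySem.List.pyGetD row agg_column none
      match d.get? group_tuple with
      | none => d.insert group_tuple agg_value
      | some prior =>
        match prior with
        | none => d.insert group_tuple agg_value
        | some p =>
          match agg_value with
          | none => d
          | some a => d.insert group_tuple (some (max p a))) dA).items
    = (table.foldl (fun d row =>
      let key := group_columns.map (fun i => PySem.List.pyGetD row i none)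
      d.insert key ((d.getD key []) ++ [PySem.List.pyGetD row agg_column none])) dB).items.map
        (fun p => (p.1, pvRed p.2)) := by
  induction table generalizing dA dB with
  | nil => simpa using hitems
  | cons row rest ih =>
    simp only [List.foldl_cons]
    exact ih _ _
      (step_items (group_columns.map (fun i => PySem.List.pyGetD row i none))
        (PySem.List.pyGetD row agg_column none) dA dB hitems hnd)
      (PySem.Dict.nodup_keys_insert dB _ _ hnd)

-- ===== VERDICT (by name: the statement is the Claim_ definition above) =====
theorem group_by_max_spec : Claim_equal_group_by_max := by
  intro table agg_column group_columns _ _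
  unfold Spec_group_by_max group_by_max group_by_max_alt
  show (table.foldl (fun d row =>
      let group_tuple := group_columns.map (fun i => PySem.List.pyGetD row i none)
      let agg_value := PySem.List.pyGetD row agg_column none
      match d.get? group_tuple with
      | none => d.insert group_tuple agg_value
      | some prior =>
        match prior with
        | none => d.insert group_tuple agg_value
        | some p =>
          match agg_value with
          | none => d
          | some a => d.insert group_tuple (some (max p a))) PySem.Dict.empty).items.map
        (fun kv => kv.1 ++ [kv.2])
    = (table.foldl (fun d row =>
      let key := group_columns.map (fun i => PySem.List.pyGetD row i none)
      d.insert key ((d.getD key []) ++ [PySem.List.pyGetD row agg_column none]))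
        PySem.Dict.empty).items.map (fun kv => kv.1 ++ [(kv.2.filterMap id).max?])
  rw [loop_invariant agg_column group_columns table PySem.Dict.empty PySem.Dict.empty rfl
        (by rw [PySem.Dict.keys_empty]; exact List.nodup_nil)]
  rw [List.map_map]
  apply List.map_congr_left
  intro p _
  simp [Function.comp, pvRed]
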